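-- pv_equiv track=rewrite | github.com/YashSarang/CS728-CourseWork | Assignment-1/task_3.py | word_shape
-- ===== SOURCE A (Python) =====
-- def word_shape(w: str) -> str:
--     """
--     Simple word shape: Xxxx, xxxx, ddd, etc. (compressed repeats)
--     """
--     out = []
--     for ch in w:
--         if ch.isupper():
--             out.append("X")
--         elif ch.islower():
--             out.append("x")
--         elif ch.isdigit():
--             out.append("d")
--         else:
--             out.append(ch)
--
--     shape = []
--     for c in out:
--         if not shape or shape[-1] != c:
--             shape.append(c)
--     return "".join(shape)
-- ===== SOURCE B (Python) =====
-- def word_shape(w: str) -> str: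
--     def cls(ch):
--         if ch.isupper():
--             return "X"
--         if ch.islower():
--             return "x"
--         if ch.isdigit():
--             return "d"
--         return ch
--
--     res = []
--     i, n = 0, len(w)
--     while i < n:
--         c = cls(w[i])
--         res.append(c)
--         i += 1
--         while i < n and cls(w[i]) == c:
--             i += 1
--     return "".join(res)
-- ===== Notes on version B (the rewrite author's own statement) =====
-- stated objective: alternative
-- what changed: Replaces A's two-pass map-then-dedupe-against-accumulator with a single two-pointer run scan that emits one classified character per run and skips the rest of each run directly in the input.
import Mathlib
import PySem

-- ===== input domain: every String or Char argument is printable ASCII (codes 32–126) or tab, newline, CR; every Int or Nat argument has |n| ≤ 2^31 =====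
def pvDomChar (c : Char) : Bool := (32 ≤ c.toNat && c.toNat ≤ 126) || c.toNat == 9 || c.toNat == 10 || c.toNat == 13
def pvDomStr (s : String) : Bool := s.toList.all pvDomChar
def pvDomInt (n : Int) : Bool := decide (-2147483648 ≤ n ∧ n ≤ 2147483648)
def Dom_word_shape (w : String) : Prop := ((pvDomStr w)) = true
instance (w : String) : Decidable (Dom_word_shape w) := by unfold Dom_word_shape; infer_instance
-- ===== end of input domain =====

-- B replaces A's map-then-dedupe-against-accumulator two-pass with a single two-pointer
-- run scan that emits one classified character per run and skips the rest of the run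
-- directly in the input (objective: alternative; same asymptotic cost).

-- ===== PORT A =====
def word_shape (w : String) : String :=
  let out := w.toList.foldl (fun out ch =>
    if ch.isUpper then out ++ ['X']
    else if ch.isLower then out ++ ['x']
    else if ch.isDigit then out ++ ['d']
    else out ++ [ch]) []
  let shape := out.foldl (fun shape c =>
    if shape = [] ∨ shape.getLast? ≠ some c then shape ++ [c] else shape) []
  String.ofList shape

-- ===== PORT B =====
-- B's per-character classifier (cls in Source B)
def wsCls (ch : Char) : Char :=
  if ch.isUpper then 'X'
  else if ch.isLower then 'x'
  else if ch.isDigit then 'd'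
  else ch

-- B's inner while loop: advance past the rest of the current run
def wsSkipRun (c : Char) : List Char → List Char
  | [] => []
  | x :: xs => if wsCls x = c then wsSkipRun c xs else x :: xs

theorem wsSkipRun_length_le (c : Char) (l : List Char) :
    (wsSkipRun c l).length ≤ l.length := by
  induction l with
  | nil => simp [wsSkipRun]
  | cons x xs ih =>
    simp only [wsSkipRun]
    split
    · exact Nat.le_succ_of_le ih
    · exact Nat.le_refl _

-- B's outer while loop: one emitted character per run
def wsScan : List Char → List Char
  | [] => []
  | x :: xs => wsCls x :: wsScan (wsSkipRun (wsCls x) xs)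
termination_by l => l.length
decreasing_by simpa using Nat.lt_succ_of_le (wsSkipRun_length_le _ _)

def word_shape_alt (w : String) : String := String.ofList (wsScan w.toList)

-- ===== PRECONDITION & SPEC =====
def Spec_word_shape (w : String) (out : String) : Prop := out = word_shape_alt w
instance (w : String) (out : String) : Decidable (Spec_word_shape w out) := by unfold Spec_word_shape; infer_instance

-- ===== CLAIM (what is proved, stated in full; the proofs are below) =====
def Claim_equal_word_shape : Prop := ∀ (w : String), Dom_word_shape w → Spec_word_shape w (word_shape w)

-- ===== LEMMAS AND PROOFS =====

-- canonical "drop consecutive duplicates, given the last kept element"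
def wsDedup : Option Char → List Char → List Char
  | _, [] => []
  | last, c :: cs => if last = some c then wsDedup last cs else c :: wsDedup (some c) cs

theorem wsFoldlMap (l : List Char) (acc : List Char) :
    l.foldl (fun out ch =>
      if ch.isUpper then out ++ ['X']
      else if ch.isLower then out ++ ['x']
      else if ch.isDigit then out ++ ['d']
      else out ++ [ch]) acc = acc ++ l.map wsCls := by
  induction l generalizing acc with
  | nil => simp
  | cons x xs ih =>
    simp only [List.foldl_cons, List.map_cons, ih, wsCls]
    split_ifs <;> simp

theorem wsFoldlDedup (l : List Char) (acc : List Char) :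
    l.foldl (fun shape c =>
      if shape = [] ∨ shape.getLast? ≠ some c then shape ++ [c] else shape) acc
    = acc ++ wsDedup acc.getLast? l := by
  induction l generalizing acc with
  | nil => simp [wsDedup]
  | cons c cs ih =>
    simp only [List.foldl_cons, wsDedup]
    by_cases h : acc.getLast? = some c
    · have hne : acc ≠ [] := by
        intro h0; rw [h0] at h; simp at h
      simp [h, hne, ih]
    · have : (acc = [] ∨ acc.getLast? ≠ some c) := Or.inr h
      simp only [if_pos this, ih, List.getLast?_concat, h]
      simp
theorem wsDedup_skipRun (c : Char) (l : List Char) :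
    wsDedup (some c) (l.map wsCls) = wsDedup none ((wsSkipRun c l).map wsCls) := by
  induction l with
  | nil => simp [wsSkipRun, wsDedup]
  | cons x xs ih =>
    by_cases h : wsCls x = c
    · simp [wsSkipRun, wsDedup, h, ih]
    · have h' : ¬ (some c = some (wsCls x)) := by
        exact fun hc => h (Option.some.inj hc).symm
      simp [wsSkipRun, wsDedup, h, h']

theorem wsScan_eq_dedup (l : List Char) :
    wsScan l = wsDedup none (l.map wsCls) := by
  induction l using wsScan.induct with
  | case1 => simp [wsScan, wsDedup]
  | case2 x xs ih =>
    simp only [wsScan, List.map_cons, wsDedup, wsDedup_skipRun, ih]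
    simp

-- ===== VERDICT (by name: the statement is the Claim_ definition above) =====
theorem word_shape_spec : Claim_equal_word_shape := by
  intro w _
  unfold Spec_word_shape word_shape word_shape_alt
  simp only [wsFoldlMap, wsFoldlDedup, List.nil_append, List.getLast?_nil,
    wsScan_eq_dedup]
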